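-- pv_equiv track=rewrite | github.com/pschwagler/beach-kings | apps/backend/services/kob_algorithms.py | _snake_draft
-- ===== SOURCE A (Python) =====
-- from typing import Any, Dict, List, Optional, Tuple
--
-- def _snake_draft(
--     player_ids: List[int],
--     num_pools: int,
-- ) -> List[List[int]]:
--     """
--     Snake-draft players into pools (seed-balanced).
--
--     Seed 1 -> pool 1, seed 2 -> pool 2, ..., seed N -> pool N,
--     seed N+1 -> pool N, seed N+2 -> pool N-1, ... (snake)
--
--     Args:
--         player_ids: Seed-ordered player list.
--         num_pools: Number of pools.
--
--     Returns:
--         List of pool player lists.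
--     """
--     pools: List[List[int]] = [[] for _ in range(num_pools)]
--     forward = True
--
--     for i, pid in enumerate(player_ids):
--         if forward:
--             pool_idx = i % num_pools
--         else:
--             pool_idx = num_pools - 1 - (i % num_pools)
--
--         pools[pool_idx].append(pid)
--
--         # Switch direction at the end of each sweep
--         if (i + 1) % num_pools == 0:
--             forward = not forward
--
--     return pools
-- ===== SOURCE B (Python) =====
-- from typing import List
--
--
-- def _snake_draft(
--     player_ids: List[int],
--     num_pools: int,
-- ) -> List[List[int]]:
--     """Snake-draft players into pools, built pool-by-pool.
--
--     Seed i belongs to pool (i % num_pools) on even sweeps and to pool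
--     (num_pools - 1 - i % num_pools) on odd sweeps; each pool collects
--     its own players directly instead of a mutating toggled loop.
--     """
--     def _pool_of(i: int) -> int:
--         q, r = divmod(i, num_pools)
--         return r if q % 2 == 0 else num_pools - 1 - r
--
--     return [
--         [pid for i, pid in enumerate(player_ids) if _pool_of(i) == p]
--         for p in range(num_pools)
--     ]
-- ===== Notes on version B (the rewrite author's own statement) =====
-- stated objective: alternative
-- what changed: Replaces the mutable pools-array-plus-forward-flag loop by a pool-major comprehension: each pool directly collects the players whose index maps to it under the closed-form snake position i -> (i%n if (i//n)%2==0 else n-1-i%n), with no mutation and no direction state.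
import Mathlib
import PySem

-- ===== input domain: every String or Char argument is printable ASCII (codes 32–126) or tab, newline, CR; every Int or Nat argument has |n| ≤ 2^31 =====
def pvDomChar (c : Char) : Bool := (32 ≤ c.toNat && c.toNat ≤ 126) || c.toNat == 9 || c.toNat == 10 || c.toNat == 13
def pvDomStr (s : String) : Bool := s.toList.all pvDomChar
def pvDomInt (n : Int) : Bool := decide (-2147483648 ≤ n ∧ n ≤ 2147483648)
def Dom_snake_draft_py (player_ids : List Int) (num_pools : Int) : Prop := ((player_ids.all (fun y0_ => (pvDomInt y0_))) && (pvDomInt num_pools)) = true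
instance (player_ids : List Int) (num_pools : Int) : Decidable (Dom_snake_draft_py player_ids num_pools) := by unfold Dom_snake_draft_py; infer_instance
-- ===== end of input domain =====

-- B replaces A's mutating pools+forward-flag loop by a stateless pool-major comprehension
-- using the closed-form snake position (alternative decomposition, not claimed faster).

-- ===== PORT A =====
-- one loop step of A: place pid into pools[pool_idx], maybe flip the direction flag
def stepA (num_pools : Int) (st : List (List Int) × Bool) (ip : Int × Int) :
    List (List Int) × Bool :=
  let pool_idx := if st.2 then PySem.Int.mod ip.1 num_pools
                  else num_pools - 1 - PySem.Int.mod ip.1 num_pools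
  -- pools[pool_idx].append(pid); an out-of-range index raises in Python (outside Pre_)
  let pools := PySem.List.pySetD st.1 pool_idx
      (PySem.List.pyGetD st.1 pool_idx [] ++ [ip.2])
  let forward := if PySem.Int.mod (ip.1 + 1) num_pools == 0 then !st.2 else st.2
  (pools, forward)

def snake_draft_py (player_ids : List Int) (num_pools : Int) : List (List Int) :=
  let pools : List (List Int) := (PySem.List.pyRange 0 num_pools 1).map (fun _ => [])
  ((PySem.List.enumerate player_ids 0).foldl (stepA num_pools) (pools, true)).1

-- ===== PORT B =====
-- closed-form snake position of seed index i (B's helper _pool_of)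
def poolOfB (num_pools i : Int) : Int :=
  if PySem.Int.mod (PySem.Int.floordiv i num_pools) 2 == 0 then PySem.Int.mod i num_pools
  else num_pools - 1 - PySem.Int.mod i num_pools

def snake_draft_py_alt (player_ids : List Int) (num_pools : Int) : List (List Int) :=
  (PySem.List.pyRange 0 num_pools 1).map (fun p =>
    ((PySem.List.enumerate player_ids 0).filter
        (fun ip => poolOfB num_pools ip.1 == p)).map (fun ip => ip.2))

-- ===== PRECONDITION & SPEC =====
-- Pre_ excludes exactly the inputs on which A raises: with a nonempty player list,
-- num_pools = 0 raises ZeroDivisionError (i % 0) and num_pools < 0 raises IndexError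
-- (pools is empty); A returns on every other input.
def Pre_snake_draft_py (player_ids : List Int) (num_pools : Int) : Prop :=
  1 ≤ num_pools ∨ player_ids = []
instance (player_ids : List Int) (num_pools : Int) : Decidable (Pre_snake_draft_py player_ids num_pools) := by unfold Pre_snake_draft_py; infer_instance

def pvWitness_snake_draft_py : List Int × Int := ([10, 20, 30, 40, 50], 2)

def Spec_snake_draft_py (player_ids : List Int) (num_pools : Int) (out : List (List Int)) : Prop := out = snake_draft_py_alt player_ids num_pools
instance (player_ids : List Int) (num_pools : Int) (out : List (List Int)) : Decidable (Spec_snake_draft_py player_ids num_pools out) := by unfold Spec_snake_draft_py; infer_instance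

-- ===== CLAIM (what is proved, stated in full; the proofs are below) =====
def Claim_equal_snake_draft_py : Prop := ∀ (player_ids : List Int) (num_pools : Int), Dom_snake_draft_py player_ids num_pools → Pre_snake_draft_py player_ids num_pools → Spec_snake_draft_py player_ids num_pools (snake_draft_py player_ids num_pools)

-- ===== LEMMAS AND PROOFS =====

-- B's pools as a function of the input list (the shape of A's loop invariant)
def poolsB (n : Int) (xs : List Int) : List (List Int) :=
  (PySem.List.pyRange 0 n 1).map (fun p =>
    ((PySem.List.enumerate xs 0).filter
        (fun ip => poolOfB n ip.1 == p)).map (fun ip => ip.2))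

lemma poolOfB_bounds (n i : Int) (hn : 1 ≤ n) :
    0 ≤ poolOfB n i ∧ poolOfB n i < n := by
  unfold poolOfB
  have h1 := PySem.Int.mod_nonneg i (b := n) (by omega)
  have h2 := PySem.Int.mod_lt i (b := n) (by omega)
  split <;> omega

-- appending one player mutates exactly pool poolOfB n (len xs) of B's pool table
lemma poolsB_snoc (n : Int) (hn : 1 ≤ n) (xs : List Int) (x : Int) :
    poolsB n (xs ++ [x]) =
      PySem.List.pySetD (poolsB n xs) (poolOfB n (xs.length : Int))
        (PySem.List.pyGetD (poolsB n xs) (poolOfB n (xs.length : Int)) [] ++ [x]) := by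
  have hj := poolOfB_bounds n (xs.length : Int) hn
  set j := poolOfB n (xs.length : Int) with hjdef
  unfold poolsB
  rw [PySem.List.pyGetD_map_pyRange_of_nonneg _ _ _ _ hj.1 hj.2,
      PySem.List.pySetD_of_nonneg _ _ hj.1]
  apply List.ext_getElem
  · simp [PySem.List.length_pyRange_one]
  · intro k hk hk'
    have hkn : k < n.toNat := by
      simpa [PySem.List.length_pyRange_one] using hk
    have henum : PySem.List.enumerate [x] ((0:Int) + xs.length) = [((xs.length : Int), x)] := by
      simp [PySem.List.enumerate_cons, PySem.List.enumerate_nil]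
    simp only [PySem.List.enumerate_append, List.getElem_map, List.getElem_set,
      List.filter_append, List.map_append, PySem.List.getElem_pyRange_one, zero_add]
    by_cases hkj : j.toNat = k
    · have hjk : j = (k : Int) := by omega
      simp [hkj, ← hjk, List.filter, ← hjdef]
    · have hne : (j == (k : Int)) = false := by
        simp only [beq_eq_false_iff_ne, ne_eq]; omega
      simp [hkj, List.filter, ← hjdef, hne]

-- the forward flag flips exactly when a sweep ends: Nat core …
lemma succ_forward_nat (N m : Nat) :
    (if (m+1) % N = 0 then !(decide (m / N % 2 = 0)) else decide (m / N % 2 = 0))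
    = decide ((m+1) / N % 2 = 0) := by
  rw [Nat.succ_div]
  by_cases hd : N ∣ m + 1
  · have h0 : (m+1) % N = 0 := Nat.mod_eq_zero_of_dvd hd
    simp only [h0, hd, if_true]
    rcases Nat.mod_two_eq_zero_or_one (m / N) with h | h <;>
      simp [Nat.add_mod, h]
  · have h0 : (m+1) % N ≠ 0 := fun h => hd (Nat.dvd_of_mod_eq_zero h)
    simp [h0, hd]

-- … and its Int form matching A's Python arithmetic
lemma succ_forward (n : Int) (hn : 1 ≤ n) (m : Nat) :
    (if PySem.Int.mod ((m : Int) + 1) n == 0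
      then !(decide (PySem.Int.mod (PySem.Int.floordiv (m : Int) n) 2 = 0))
      else decide (PySem.Int.mod (PySem.Int.floordiv (m : Int) n) 2 = 0))
    = decide (PySem.Int.mod (PySem.Int.floordiv ((m : Int) + 1) n) 2 = 0) := by
  obtain ⟨N, rfl⟩ : ∃ N : Nat, n = (N : Int) := ⟨n.toNat, by omega⟩
  have hm1 : ((m : Int) + 1) = ((m + 1 : Nat) : Int) := by push_cast; ring
  rw [hm1, PySem.Int.mod_natCast, PySem.Int.floordiv_natCast, PySem.Int.floordiv_natCast]
  rw [show (2:Int) = ((2:Nat):Int) from rfl, PySem.Int.mod_natCast, PySem.Int.mod_natCast]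
  simp only [beq_iff_eq, Nat.cast_eq_zero]
  exact succ_forward_nat N m

-- A's chosen index equals B's closed-form position when the flag carries the sweep parity
lemma idx_eq_poolOfB (n : Int) (m : Nat) :
    (if decide (PySem.Int.mod (PySem.Int.floordiv (m : Int) n) 2 = 0) = true
      then PySem.Int.mod (m : Int) n else n - 1 - PySem.Int.mod (m : Int) n)
    = poolOfB n (m : Int) := by
  unfold poolOfB
  by_cases h : PySem.Int.mod (PySem.Int.floordiv (m : Int) n) 2 = 0
  · simp_all
  · simp only [decide_eq_true_eq]
    rw [if_neg h, if_neg (by simpa using h)]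


-- main invariant: A's fold state after xs is (B's pools of xs, the sweep-parity flag)
lemma fold_invariant (n : Int) (hn : 1 ≤ n) (xs : List Int) :
    (PySem.List.enumerate xs 0).foldl (stepA n)
        ((PySem.List.pyRange 0 n 1).map (fun _ => []), true)
      = (poolsB n xs,
         decide (PySem.Int.mod (PySem.Int.floordiv (xs.length : Int) n) 2 = 0)) := by
  induction xs using List.reverseRecOn with
  | nil =>
      have h0 : PySem.Int.floordiv 0 n = 0 := by
        rw [PySem.Int.floordiv_eq_ediv_of_pos (by omega)]; simp
      simp [poolsB, PySem.List.enumerate_nil, h0]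
  | append_singleton xs x ih =>
      have henum : PySem.List.enumerate [x] ((0:Int) + xs.length) = [((xs.length : Int), x)] := by
        simp [PySem.List.enumerate_cons, PySem.List.enumerate_nil]
      rw [PySem.List.enumerate_append, List.foldl_append, ih, henum]
      simp only [List.foldl_cons, List.foldl_nil]
      unfold stepA
      simp only []
      rw [idx_eq_poolOfB n xs.length, ← poolsB_snoc n hn xs x]
      have hlen : ((xs ++ [x]).length : Int) = (xs.length : Int) + 1 := by
        simp
      rw [hlen, ← succ_forward n hn xs.length]

-- ===== VERDICT (by name: the statement is the Claim_ definition above) =====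
theorem snake_draft_py_spec : Claim_equal_snake_draft_py := by
  intro player_ids num_pools _ hpre
  unfold Spec_snake_draft_py
  rcases hpre with hn | rfl
  · show ((PySem.List.enumerate player_ids 0).foldl (stepA num_pools)
        ((PySem.List.pyRange 0 num_pools 1).map (fun _ => []), true)).1
      = snake_draft_py_alt player_ids num_pools
    rw [fold_invariant num_pools hn player_ids]
    rfl
  · simp [snake_draft_py, snake_draft_py_alt, PySem.List.enumerate_nil]
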